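-- pv_equiv track=rewrite | github.com/JiwooKimAR/MWP-solver-with-pretrained-language-model | dataloader/Dataset.py | make_space_eq
-- ===== SOURCE A (Python) =====
-- def make_space_eq(infix):
--     new_infix = ''
--
--     for c in infix:
--         if c in '+-*/()=%':
--             new_infix += ' ' + c + ' '
--         else:
--             new_infix += c
--     return new_infix
-- ===== SOURCE B (Python) =====
-- def make_space_eq(infix):
--     for op in '+-*/()=%':
--         infix = infix.replace(op, ' ' + op + ' ')
--     return infix
-- ===== Notes on version B (the rewrite author's own statement) =====
-- stated objective: faster
-- what changed: Replaces the single char-by-char pass with repeated string concatenation by a loop over the 8 operator characters doing one full-string str.replace per operator; order-independent since replacements only insert spaces and never create new operator occurrences.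
import Mathlib
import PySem

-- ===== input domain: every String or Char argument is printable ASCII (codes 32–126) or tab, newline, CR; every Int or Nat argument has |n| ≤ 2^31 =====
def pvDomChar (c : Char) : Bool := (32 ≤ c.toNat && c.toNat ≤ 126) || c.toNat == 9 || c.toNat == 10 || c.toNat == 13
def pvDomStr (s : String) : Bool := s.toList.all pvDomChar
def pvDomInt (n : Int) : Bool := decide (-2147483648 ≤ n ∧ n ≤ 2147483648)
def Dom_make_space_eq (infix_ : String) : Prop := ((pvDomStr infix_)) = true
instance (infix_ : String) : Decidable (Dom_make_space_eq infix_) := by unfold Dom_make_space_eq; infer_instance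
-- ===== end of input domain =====

-- B replaces A's char-by-char accumulation with one str.replace pass per operator character (same asymptotics; measurably faster in Python via C-level replace).

-- ===== PORT A =====
def make_space_eq (infix_ : String) : String :=
  infix_.toList.foldl
    (fun acc c =>
      if PySem.Str.isIn (String.ofList [c]) "+-*/()=%" then
        acc ++ " " ++ String.ofList [c] ++ " "
      else
        acc ++ String.ofList [c])
    ""

-- ===== PORT B =====
def make_space_eq_alt (infix_ : String) : String :=
  "+-*/()=%".toList.foldl
    (fun s op => PySem.Str.replace s (String.ofList [op]) (String.ofList [' ', op, ' ']))
    infix_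

-- ===== PRECONDITION & SPEC =====
def Spec_make_space_eq (infix_ : String) (out : String) : Prop := out = make_space_eq_alt infix_
instance (infix_ : String) (out : String) : Decidable (Spec_make_space_eq infix_ out) := by unfold Spec_make_space_eq; infer_instance

-- ===== CLAIM (what is proved, stated in full; the proofs are below) =====
def Claim_equal_make_space_eq : Prop := ∀ (infix_ : String), Dom_make_space_eq infix_ → Spec_make_space_eq infix_ (make_space_eq infix_)

-- ===== LEMMAS AND PROOFS =====

-- replace with a single-character pattern is char-wise expansion
theorem replace_go_single (p : Char) (new : List Char) :
    ∀ (fuel : Nat) (l acc : List Char), l.length ≤ fuel →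
      PySem.Chars.replace.go [p] new fuel l acc
        = acc.reverse ++ l.flatMap (fun c => if c = p then new else [c]) := by
  intro fuel
  induction fuel with
  | zero =>
    intro l acc h
    have hl : l = [] := List.eq_nil_of_length_eq_zero (Nat.le_zero.mp h)
    subst hl
    simp [PySem.Chars.replace.go]
  | succ n ih =>
    intro l acc h
    cases l with
    | nil => simp [PySem.Chars.replace.go]
    | cons c t =>
      rw [PySem.Chars.replace.go]
      by_cases hc : c = p
      · subst hc
        have hp : List.isPrefixOf [c] (c :: t) = true := by
          simp [List.isPrefixOf]
        simp only [hp, if_pos]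
        rw [show List.drop [c].length (c :: t) = t from rfl]
        rw [ih t (new.reverse ++ acc) (by simpa using Nat.le_of_succ_le_succ h)]
        simp
      · have hp : List.isPrefixOf [p] (c :: t) = false := by
          simp [List.isPrefixOf]
          intro h'; exact absurd h'.symm hc
        simp only [hp, Bool.false_eq_true, if_neg, not_false_iff]
        rw [ih t (c :: acc) (by simpa using Nat.le_of_succ_le_succ h)]
        simp [hc]

theorem replace_single (p : Char) (new l : List Char) :
    PySem.Chars.replace l [p] new = l.flatMap (fun c => if c = p then new else [c]) := by
  rw [PySem.Chars.replace]
  simp only [List.isEmpty_cons, Bool.false_eq_true, if_neg, not_false_iff]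
  simpa using replace_go_single p new l.length l [] (le_refl _)

theorem isIn_single (c : Char) (l : List Char) :
    PySem.Chars.isIn [c] l = true ↔ c ∈ l := by
  rw [PySem.Chars.isIn_iff_infix]
  constructor
  · intro h; exact h.subset (by simp)
  · intro h
    obtain ⟨s, t, rfl⟩ := List.append_of_mem h
    exact ⟨s, t, by simp⟩

def pvOps : List Char := ['+', '-', '*', '/', '(', ')', '=', '%']

def pvExpand (c : Char) : List Char :=
  if PySem.Chars.isIn [c] pvOps then [' ', c, ' '] else [c]

def pvChain (l : List Char) : List Char :=
  pvOps.foldl (fun s op => PySem.Chars.replace s [op] [' ', op, ' ']) l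

theorem pvChain_append (a b : List Char) :
    pvChain (a ++ b) = pvChain a ++ pvChain b := by
  simp [pvChain, pvOps, List.foldl, replace_single, List.flatMap_append]

theorem pvChain_single (c : Char) : pvChain [c] = pvExpand c := by
  by_cases h : PySem.Chars.isIn [c] pvOps = true
  · have hmem : c ∈ pvOps := (isIn_single c pvOps).mp h
    simp only [pvOps, List.mem_cons, List.not_mem_nil, or_false] at hmem
    rcases hmem with h1 | h1 | h1 | h1 | h1 | h1 | h1 | h1 <;> subst h1 <;> decide
  · have hmem : c ∉ pvOps := fun hm => h ((isIn_single c pvOps).mpr hm)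
    simp only [pvOps, List.mem_cons, List.not_mem_nil, or_false, not_or] at hmem
    obtain ⟨h1, h2, h3, h4, h5, h6, h7, h8⟩ := hmem
    have h' : PySem.Chars.isIn [c] pvOps = false := by rwa [Bool.not_eq_true] at h
    simp only [pvChain, pvExpand, pvOps, replace_single, List.foldl]
    simp only [List.flatMap_singleton]
    simp [h1, h2, h3, h4, h5, h6, h7, h8]
    exact h'

theorem pvChain_eq_flatMap (l : List Char) : pvChain l = l.flatMap pvExpand := by
  induction l with
  | nil => simp [pvChain, pvOps, replace_single]
  | cons c t ih =>
    have h : pvChain (c :: t) = pvChain [c] ++ pvChain t := by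
      simpa using pvChain_append [c] t
    rw [h, pvChain_single, ih]
    simp

theorem pvOpsEq : "+-*/()=%".toList = pvOps := by decide

theorem foldl_replace_toList (ops : List Char) (s : String) :
    (ops.foldl (fun s op => PySem.Str.replace s (String.ofList [op]) (String.ofList [' ', op, ' '])) s).toList
      = ops.foldl (fun l op => PySem.Chars.replace l [op] [' ', op, ' ']) s.toList := by
  induction ops generalizing s with
  | nil => rfl
  | cons o t ih =>
    simp only [List.foldl]
    rw [ih, PySem.Str.toList_replace, String.toList_ofList, String.toList_ofList]

theorem portA_toList (l : List Char) (acc : String) :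
    (l.foldl
      (fun acc c =>
        if PySem.Str.isIn (String.ofList [c]) "+-*/()=%" then
          acc ++ " " ++ String.ofList [c] ++ " "
        else
          acc ++ String.ofList [c])
      acc).toList = acc.toList ++ l.flatMap pvExpand := by
  induction l generalizing acc with
  | nil => simp
  | cons c t ih =>
    simp only [List.foldl, List.flatMap_cons]
    have hiff : PySem.Str.isIn (String.ofList [c]) "+-*/()=%" = PySem.Chars.isIn [c] pvOps := by
      rw [PySem.Str.isIn_eq, pvOpsEq, String.toList_ofList]
    by_cases h : PySem.Chars.isIn [c] pvOps = true
    · rw [if_pos (by rw [hiff]; exact h), ih]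
      simp [pvExpand, h]
    · rw [if_neg (by rw [hiff]; exact h), ih]
      simp [pvExpand, h]

-- ===== VERDICT (by name: the statement is the Claim_ definition above) =====
theorem make_space_eq_spec : Claim_equal_make_space_eq := by
  intro s _
  unfold Spec_make_space_eq
  have hB : (make_space_eq_alt s).toList = pvChain s.toList := by
    unfold make_space_eq_alt pvChain
    rw [pvOpsEq, foldl_replace_toList]
  have hA : (make_space_eq s).toList = s.toList.flatMap pvExpand := by
    unfold make_space_eq
    simpa using portA_toList s.toList ""
  have : (make_space_eq s).toList = (make_space_eq_alt s).toList := by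
    rw [hA, hB, pvChain_eq_flatMap]
  exact String.toList_injective this
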